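-- pv_equiv track=rewrite | github.com/courtois-neuromod/shinobi_behav | src/features/features.py | interpolate_missing_pos
-- ===== SOURCE A (Python) =====
-- from math import ceil
--
-- def interpolate_missing_pos(time2pos_run, uniques):
--     '''
--     Some pos are missing, interpolate them by averaging the two nearest pos
--     '''
--     try:
--         start = min(uniques)
--         stop = max(uniques)
--     except:
--         start = 0
--         stop = 0
--     time2pos_full = []
--     for pos in range(start, stop):
--         if pos in uniques:
--             time2pos_full.append(time2pos_run[uniques.index(pos)]) # append the value if pos in uniques
--             last_frame = pos
--         else:
--             next_found = False
--             next_frame = 1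
--             while next_found == False:
--                 if pos+next_frame in uniques:
--                     interp_val = ceil((time2pos_run[uniques.index(last_frame)]+time2pos_run[uniques.index(pos+next_frame)])/2)
--                     time2pos_full.append(interp_val)
--                     next_found = True
--                 else:
--                     next_frame = next_frame+1
--     return time2pos_full
-- ===== SOURCE B (Python) =====
-- def interpolate_missing_pos(time2pos_run, uniques):
--     '''
--     Fill positions min..max-1: a known position keeps its (first-occurrence)
--     value, each gap gets ceil of the average of the two surrounding known
--     values.  One dict pass (pos -> first index) + a sort over the distinct
--     positions instead of a per-position membership/index scan.
--     '''
--     first = {}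
--     for i, u in enumerate(uniques):
--         if u not in first:
--             first[u] = i
--     ks = sorted(first)
--     out = []
--     for p, q in zip(ks, ks[1:]):
--         vp = time2pos_run[first[p]]
--         vq = time2pos_run[first[q]]
--         fill = -(-(vp + vq) // 2)
--         out.append(vp)
--         out.extend([fill] * (q - p - 1))
--     return out
-- ===== Notes on version B (the rewrite author's own statement) =====
-- stated objective: faster
-- what changed: Instead of scanning every position in range(min,max) with 'in uniques' membership tests, repeated list.index calls and an inner while-search for the next known position, B builds a pos->first-index dict in one pass, sorts the distinct positions once, and emits each known value followed by a run of ceiling-average fills for each consecutive gap.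
-- outside the precondition, e.g. on interpolate_missing_pos([5], [0, 1]): A returns [5], B raises IndexError
import Mathlib
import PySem

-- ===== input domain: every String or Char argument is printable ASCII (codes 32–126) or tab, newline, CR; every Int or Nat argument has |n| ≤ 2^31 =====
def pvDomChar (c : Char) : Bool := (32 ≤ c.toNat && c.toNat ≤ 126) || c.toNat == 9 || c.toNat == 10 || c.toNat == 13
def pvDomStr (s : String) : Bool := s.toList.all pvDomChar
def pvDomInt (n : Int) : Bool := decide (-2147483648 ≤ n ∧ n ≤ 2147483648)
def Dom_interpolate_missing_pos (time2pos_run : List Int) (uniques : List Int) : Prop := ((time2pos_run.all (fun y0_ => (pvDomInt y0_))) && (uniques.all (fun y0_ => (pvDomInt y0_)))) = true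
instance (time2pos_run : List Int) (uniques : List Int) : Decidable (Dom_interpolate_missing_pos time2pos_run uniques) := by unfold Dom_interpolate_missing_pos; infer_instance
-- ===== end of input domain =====

-- B replaces A's per-position membership/index scans (O(range·n)) by one pos→first-index dict
-- plus a sort of the distinct positions; A = B is proved on Pre_ (where the Python A returns).


-- ===== PORT A =====
-- math.ceil((a+b)/2): ported as exact integer ceiling division -((-s)//2); exact on Dom
-- (|values| ≤ 2^31 keeps the float quotient exact, so ceil agrees with ceiling division)
def pvCeilHalf (s : Int) : Int := -(PySem.Int.floordiv (-s) 2)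

-- the inner 'while next_found == False' search: first next_frame ≥ nf with pos+next_frame in uniques.
-- fuel makes it structural; the caller passes (stop-pos).toNat, which always suffices because
-- stop = max(uniques) ∈ uniques lies ahead, so the fuel-exhaustion branch is never taken
def pvFindNext (uniques : List Int) (pos : Int) : Nat → Int → Int
  | 0, nf => pos + nf
  | fuel+1, nf => if (pos + nf) ∈ uniques then pos + nf else pvFindNext uniques pos fuel (nf + 1)

-- one iteration of A's for-loop; state = (time2pos_full, last_frame).
-- time2pos_run[uniques.index(pos)] is pyGetD at the first-occurrence index (total form with
-- default 0; Python raises IndexError exactly on the inputs Pre_ excludes)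
def pvAStep (t u : List Int) (stop : Int) (st : List Int × Int) (pos : Int) : List Int × Int :=
  if pos ∈ u then
    (st.1 ++ [PySem.List.pyGetD t (((PySem.List.index? u pos).getD 0 : Nat) : Int) 0], pos)
  else
    (st.1 ++ [pvCeilHalf (PySem.List.pyGetD t (((PySem.List.index? u st.2).getD 0 : Nat) : Int) 0
            + PySem.List.pyGetD t (((PySem.List.index? u (pvFindNext u pos (stop - pos).toNat 1)).getD 0 : Nat) : Int) 0)], st.2)

def interpolate_missing_pos (time2pos_run : List Int) (uniques : List Int) : List Int :=
  -- try: start = min(uniques); stop = max(uniques); except: start = 0; stop = 0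
  let start : Int := match PySem.List.min? uniques (fun x => x) with | some m => m | none => 0
  let stop  : Int := match PySem.List.max? uniques (fun x => x) with | some m => m | none => 0
  -- last_frame is unbound in Python until the first iteration (pos = start ∈ uniques) assigns
  -- it, so initialising it to start here is unobservable
  ((PySem.List.pyRange start stop 1).foldl (pvAStep time2pos_run uniques stop) ([], start)).1

-- ===== PORT B =====
-- one iteration of B's loop over consecutive sorted known positions (p, q): append p's value,
-- then (q-p-1) copies of the ceiling-average fill ([fill] * (q-p-1); here always q > p)
def pvBStep (t : List Int) (first : PySem.Dict Int Int) (out : List Int) (pq : Int × Int) : List Int :=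
  let vp := PySem.List.pyGetD t (first.getD pq.1 0) 0
  let vq := PySem.List.pyGetD t (first.getD pq.2 0) 0
  let fill := -(PySem.Int.floordiv (-(vp + vq)) 2)
  out ++ [vp] ++ List.replicate (pq.2 - pq.1 - 1).toNat fill

def interpolate_missing_pos_alt (time2pos_run : List Int) (uniques : List Int) : List Int :=
  -- first.setdefault(u, i) over enumerate(uniques): pos → index of its first occurrence
  let first : PySem.Dict Int Int :=
    (PySem.List.enumerate uniques 0).foldl (fun d p => d.setdefault p.2 p.1) PySem.Dict.empty
  let ks := PySem.List.sorted first.keys (fun x => x) false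
  (ks.zip ks.tail).foldl (pvBStep time2pos_run first) []

-- ===== PRECONDITION & SPEC =====
-- Pre_ excludes the inputs where, with at least two distinct positions present, some position's
-- first-occurrence index falls outside time2pos_run: the Python A raises IndexError on almost
-- all of them (and B does too); on the rare ones where A happens never to read the value of the
-- maximal position it still returns a list, while B, which reads one value per distinct
-- position, raises (cite in claim.json).
def Pre_interpolate_missing_pos (time2pos_run : List Int) (uniques : List Int) : Prop :=
  (∃ a ∈ uniques, ∃ b ∈ uniques, a ≠ b) →
    ∀ x ∈ uniques, (PySem.List.index? uniques x).getD 0 < time2pos_run.length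

instance (time2pos_run : List Int) (uniques : List Int) : Decidable (Pre_interpolate_missing_pos time2pos_run uniques) := by
  unfold Pre_interpolate_missing_pos; infer_instance

def pvWitness_interpolate_missing_pos : List Int × List Int := ([1, 7], [0, 3])

def Spec_interpolate_missing_pos (time2pos_run : List Int) (uniques : List Int) (out : List Int) : Prop := out = interpolate_missing_pos_alt time2pos_run uniques
instance (time2pos_run : List Int) (uniques : List Int) (out : List Int) : Decidable (Spec_interpolate_missing_pos time2pos_run uniques out) := by unfold Spec_interpolate_missing_pos; infer_instance

-- ===== CLAIM (what is proved, stated in full; the proofs are below) =====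
def Claim_equal_interpolate_missing_pos : Prop := ∀ (time2pos_run : List Int) (uniques : List Int), Dom_interpolate_missing_pos time2pos_run uniques → Pre_interpolate_missing_pos time2pos_run uniques → Spec_interpolate_missing_pos time2pos_run uniques (interpolate_missing_pos time2pos_run uniques)

-- ===== LEMMAS AND PROOFS =====
-- The equality in fact holds unconditionally for the (totalised) ports: both sides read
-- time2pos_run through the same defaulted lookup, so the proofs below never use the Pre_
-- hypothesis (Pre_'s role is to keep the claim to inputs where the Python A actually returns).

-- the value both programs attach to a known position x: time2pos_run at x's first index
def pvVal (t u : List Int) (x : Int) : Int :=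
  PySem.List.pyGetD t (((PySem.List.index? u x).getD 0 : Nat) : Int) 0

-- the common output shape over the sorted chain of known positions
def pvSegs (vv : Int → Int) : List Int → List Int
  | p :: q :: rest =>
      vv p :: (List.replicate (q - p - 1).toNat (pvCeilHalf (vv p + vv q)) ++ pvSegs vv (q :: rest))
  | _ => []

lemma pvFindNext_eq (u : List Int) (pos q : Int) (hq : q ∈ u)
    (hgap : ∀ x, pos < x → x < q → x ∉ u) :
    ∀ (fuel : Nat) (nf : Int), 1 ≤ nf → pos + nf ≤ q → (q - pos - nf).toNat < fuel →
      pvFindNext u pos fuel nf = q := by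
  intro fuel
  induction fuel with
  | zero => intro nf _ _ h; omega
  | succ f ih =>
      intro nf h1 hle hfuel
      simp only [pvFindNext]
      by_cases hmem : (pos + nf) ∈ u
      · simp only [hmem, if_true]
        by_contra hne
        exact hgap (pos + nf) (by omega) (by omega) hmem
      · simp only [hmem, if_false]
        have hne : pos + nf ≠ q := by rintro rfl; exact hmem hq
        exact ih (nf + 1) (by omega) (by omega) (by omega)

lemma pvA_gap (t u : List Int) (stop p q : Int) (hq : q ∈ u) (hqs : q ≤ stop)
    (hgap : ∀ x, p < x → x < q → x ∉ u) :
    ∀ (n : Nat) (a : Int) (acc : List Int), a = q - n → p < a →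
      (PySem.List.pyRange a q 1).foldl (pvAStep t u stop) (acc, p)
        = (acc ++ List.replicate n (pvCeilHalf (pvVal t u p + pvVal t u q)), p) := by
  intro n
  induction n with
  | zero =>
      intro a acc ha _
      have : q ≤ a := by omega
      rw [PySem.List.pyRange_one_eq_nil this]
      simp
  | succ m ih =>
      intro a acc ha hpa
      have haq : a < q := by omega
      rw [PySem.List.pyRange_one_cons haq]
      simp only [List.foldl_cons]
      have hamem : a ∉ u := hgap a hpa haq
      have hstep : pvAStep t u stop (acc, p) a
          = (acc ++ [pvCeilHalf (pvVal t u p + pvVal t u q)], p) := by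
        simp only [pvAStep, hamem, if_false]
        rw [pvFindNext_eq u a q hq (fun x hx1 hx2 => hgap x (by omega) hx2) (stop - a).toNat 1
          (by omega) (by omega) (by omega)]
        rfl
      rw [hstep, ih (a + 1) (acc ++ [pvCeilHalf (pvVal t u p + pvVal t u q)]) (by omega) (by omega)]
      simp [List.replicate_succ]

lemma pvA_chain (t u : List Int) (stop : Int) :
    ∀ (ks : List Int) (p : Int) (acc : List Int) (l0 : Int), p ∈ u →
      ks.Pairwise (· < ·) → (∀ x, x ∈ ks ↔ (x ∈ u ∧ p < x)) →
      (p :: ks).getLast (by simp) = stop →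
      ∃ lf, (PySem.List.pyRange p stop 1).foldl (pvAStep t u stop) (acc, l0)
              = (acc ++ pvSegs (pvVal t u) (p :: ks), lf) := by
  intro ks
  induction ks with
  | nil =>
      intro p acc l0 hp _ _ hlast
      simp at hlast
      subst hlast
      rw [PySem.List.pyRange_one_eq_nil le_rfl]
      exact ⟨l0, by simp [pvSegs]⟩
  | cons q rest ih =>
      intro p acc l0 hp hpw hmem hlast
      have hq : q ∈ u ∧ p < q := (hmem q).mp (by simp)
      have hqstop : q ≤ stop := by
        have hlast' : (q :: rest).getLast (by simp) = stop := by
          rwa [List.getLast_cons_cons] at hlast   -- placeholder; fix below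
        rcases List.getLast_mem (l := q :: rest) (by simp) with _
        have hmemlast : stop ∈ q :: rest := by
          rw [← hlast']; exact List.getLast_mem _
        rcases List.mem_cons.mp hmemlast with h | h
        · omega
        · have := (List.pairwise_cons.mp hpw).1 stop h; omega
      -- split the range at q
      have hsplit : PySem.List.pyRange p stop 1
          = PySem.List.pyRange p (p+1) 1 ++ PySem.List.pyRange (p+1) q 1 ++ PySem.List.pyRange q stop 1 := by
        rw [List.append_assoc, ← PySem.List.pyRange_one_append (p+1) q stop (by omega) hqstop,
            ← PySem.List.pyRange_one_append p (p+1) stop (by omega) (by omega)]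
      rw [hsplit]
      simp only [List.foldl_append]
      rw [PySem.List.pyRange_one_singleton]
      simp only [List.foldl_cons, List.foldl_nil]
      have hstep1 : pvAStep t u stop (acc, l0) p = (acc ++ [pvVal t u p], p) := by
        simp only [pvAStep, hp, if_true]; rfl
      rw [hstep1]
      have hgap : ∀ x, p < x → x < q → x ∉ u := by
        intro x hx1 hx2 hxu
        have : x ∈ q :: rest := (hmem x).mpr ⟨hxu, hx1⟩
        rcases List.mem_cons.mp this with h | h
        · omega
        · have := (List.pairwise_cons.mp hpw).1 x h; omega
      rw [pvA_gap t u stop p q hq.1 hqstop hgap (q - p - 1).toNat (p+1)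
            (acc ++ [pvVal t u p]) (by omega) (by omega)]
      -- now the tail from q
      have hmem' : ∀ x, x ∈ rest ↔ (x ∈ u ∧ q < x) := by
        intro x
        constructor
        · intro hx
          have hxq := (List.pairwise_cons.mp hpw).1 x hx
          have := (hmem x).mp (by simp [hx])
          exact ⟨this.1, hxq⟩
        · rintro ⟨hxu, hxq⟩
          have : x ∈ q :: rest := (hmem x).mpr ⟨hxu, by omega⟩
          rcases List.mem_cons.mp this with h | h
          · omega
          · exact h
      have hlast' : (q :: rest).getLast (by simp) = stop := by
        rwa [List.getLast_cons_cons] at hlast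
      obtain ⟨lf, hlf⟩ := ih q (acc ++ [pvVal t u p] ++ List.replicate (q - p - 1).toNat
          (pvCeilHalf (pvVal t u p + pvVal t u q))) p hq.1 (List.pairwise_cons.mp hpw).2 hmem' hlast'
      refine ⟨lf, ?_⟩
      rw [hlf]
      simp [pvSegs, List.append_assoc]

lemma pvB_fold (t u : List Int) (first : PySem.Dict Int Int) :
    ∀ (ks : List Int) (acc : List Int),
      (∀ x ∈ ks, PySem.List.pyGetD t (first.getD x 0) 0 = pvVal t u x) →
      (ks.zip ks.tail).foldl (pvBStep t first) acc = acc ++ pvSegs (pvVal t u) ks := by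
  intro ks
  induction ks with
  | nil => intro acc _; simp [pvSegs]
  | cons p rest ih =>
      intro acc hv
      match rest, ih with
      | [], _ => simp [pvSegs]
      | q :: rest', ih =>
          simp only [List.tail_cons, List.zip_cons_cons, List.foldl_cons]
          have := ih (pvBStep t first acc (p, q)) (fun x hx => hv x (by simp [List.mem_cons] at hx ⊢; tauto))
          simp only [List.tail_cons] at this
          rw [this]
          simp only [pvBStep, pvSegs]
          rw [hv p (by simp), hv q (by simp)]
          simp [pvCeilHalf, List.append_assoc]

lemma pvKeys_setdefault (d : PySem.Dict Int Int) (k v : Int) :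
    (d.setdefault k v).keys = PySem.Set.add d.keys k := by
  by_cases h : d.contains k = true
  · rw [PySem.Dict.setdefault_of_contains d v h,
        PySem.Set.add_of_mem ((PySem.Dict.contains_iff_mem_keys d k).mp h)]
  · rw [PySem.Dict.setdefault_of_not_contains d v (by simpa using h),
        PySem.Dict.keys_insert_of_not_contains d v (by simpa using h),
        PySem.Set.add_of_not_mem (fun hm => h ((PySem.Dict.contains_iff_mem_keys d k).mpr hm))]

lemma pvFirst_keys :
    ∀ (l : List Int) (s : Int) (d : PySem.Dict Int Int),
      ((PySem.List.enumerate l s).foldl (fun d p => d.setdefault p.2 p.1) d).keys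
        = PySem.Set.update d.keys l := by
  intro l
  induction l with
  | nil => intro s d; simp [PySem.List.enumerate_nil, PySem.Set.update_nil]
  | cons y l ih =>
      intro s d
      rw [PySem.List.enumerate_cons]
      simp only [List.foldl_cons]
      rw [ih (s+1) (d.setdefault y s), pvKeys_setdefault, PySem.Set.update_cons]

lemma pvFirst_get? :
    ∀ (l : List Int) (s : Int) (d : PySem.Dict Int Int) (x : Int),
      ((PySem.List.enumerate l s).foldl (fun d p => d.setdefault p.2 p.1) d).get? x
        = match d.get? x with
          | some v => some v
          | none => (PySem.List.index? l x).map (fun k => s + (k : Int)) := by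
  intro l
  induction l with
  | nil =>
      intro s d x
      simp only [PySem.List.enumerate_nil, List.foldl_nil]
      cases d.get? x <;> simp [PySem.List.index?]
  | cons y l ih =>
      intro s d x
      rw [PySem.List.enumerate_cons]
      simp only [List.foldl_cons]
      rw [ih (s+1) (d.setdefault y s) x]
      by_cases hxy : x = y
      · subst hxy
        rw [PySem.Dict.get?_setdefault_self d x s]
        rw [PySem.List.index?_cons_self x l]
        cases d.get? x <;> simp
      · rw [PySem.Dict.get?_setdefault_of_ne d s hxy,
            PySem.List.index?_cons_of_ne l (fun h => hxy h.symm)]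
        cases d.get? x
        · simp only []
          cases PySem.List.index? l x <;> simp
          ring
        · simp

lemma pvLast_le (l : List Int) (hpw : l.Pairwise (· < ·)) (hne : l ≠ []) :
    ∀ x ∈ l, x ≤ l.getLast hne := by
  induction l with
  | nil => simp
  | cons a l' ih =>
      intro x hx
      cases l' with
      | nil => simp at hx; simp [hx]
      | cons b t =>
          rw [List.getLast_cons_cons]
          rcases List.mem_cons.mp hx with h | h
          · subst h
            have hmem : (b :: t).getLast (by simp) ∈ b :: t := List.getLast_mem _
            have := (List.pairwise_cons.mp hpw).1 _ hmem
            omega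
          · exact ih (List.pairwise_cons.mp hpw).2 (by simp) x h

theorem pv_main_eq (t u : List Int) :
    interpolate_missing_pos t u = interpolate_missing_pos_alt t u := by
  set first : PySem.Dict Int Int :=
    (PySem.List.enumerate u 0).foldl (fun d p => d.setdefault p.2 p.1) PySem.Dict.empty with hfirst
  have hkeys : first.keys = PySem.Set.ofList u := by
    rw [hfirst, pvFirst_keys u 0 PySem.Dict.empty, PySem.Dict.keys_empty,
        PySem.Set.update_nil_left]
  set ks := PySem.List.sorted first.keys (fun x => x) false with hks
  have hmemks : ∀ x, x ∈ ks ↔ x ∈ u := by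
    intro x
    rw [hks, PySem.List.mem_sorted, hkeys, PySem.Set.mem_ofList]
  have hnd : ks.Nodup := by
    rw [hks]
    exact ((PySem.List.sorted_perm first.keys (fun x => x) false).nodup_iff).mpr
      (hkeys ▸ PySem.Set.nodup_ofList u)
  have hpw : ks.Pairwise (· < ·) := by
    have h1 : ks.Pairwise (· ≤ ·) := by
      have := PySem.List.sorted_pairwise (κ := Int) first.keys (fun x => x)
      simpa [hks] using this
    exact (h1.and hnd).imp (fun h => lt_of_le_of_ne h.1 h.2)
  have hv : ∀ x ∈ ks, PySem.List.pyGetD t (first.getD x 0) 0 = pvVal t u x := by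
    intro x hx
    have hxu : x ∈ u := (hmemks x).mp hx
    cases hk : PySem.List.index? u x with
    | none => exact absurd ((PySem.List.index?_eq_none_iff u x).mp hk) (by simpa using hxu)
    | some k =>
        have hk' : List.idxOf? x u = some k := by
          rw [← PySem.List.index?_eq_idxOf?]; exact hk
        rw [PySem.Dict.getD_eq_get?_getD, hfirst, pvFirst_get? u 0 PySem.Dict.empty x]
        simp [PySem.Dict.get?_empty, hk', pvVal]
  have hB : interpolate_missing_pos_alt t u = pvSegs (pvVal t u) ks := by
    rw [interpolate_missing_pos_alt]
    exact pvB_fold t u first ks [] hv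
  by_cases hune : u = []
  · subst hune
    rw [hB]
    have hksnil : ks = [] := by
      cases h : ks with
      | nil => rfl
      | cons a l => exact absurd ((hmemks a).mp (h ▸ List.mem_cons_self)) (by simp)
    rw [hksnil]
    rfl
  · obtain ⟨mn, hmn⟩ : ∃ m, PySem.List.min? u (fun x => x) = some m := by
      cases h : PySem.List.min? u (fun x => x) with
      | none => exact absurd ((PySem.List.min?_eq_none_iff u _).mp h) hune
      | some m => exact ⟨m, rfl⟩
    obtain ⟨mx, hmx⟩ : ∃ m, PySem.List.max? u (fun x => x) = some m := by
      cases h : PySem.List.max? u (fun x => x) with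
      | none => exact absurd ((PySem.List.max?_eq_none_iff u _).mp h) hune
      | some m => exact ⟨m, rfl⟩
    have hmnu : mn ∈ u := PySem.List.min?_mem hmn
    have hmxu : mx ∈ u := PySem.List.max?_mem hmx
    have hmnmin : ∀ y ∈ u, mn ≤ y := fun y hy => PySem.List.min?_isMin hmn y hy
    have hmxmax : ∀ y ∈ u, y ≤ mx := fun y hy => PySem.List.max?_isMax hmx y hy
    have hksne : ks ≠ [] := by
      intro h
      exact absurd ((hmemks mn).mpr hmnu) (by simp [h])
    obtain ⟨hd, tl, hkscons⟩ := List.exists_cons_of_ne_nil hksne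
    have hpw' : (hd :: tl).Pairwise (· < ·) := hkscons ▸ hpw
    have hhd : hd = mn := by
      have hhdu : hd ∈ u := (hmemks hd).mp (by simp [hkscons])
      have h1 : mn ≤ hd := hmnmin hd hhdu
      have hmnks : mn ∈ ks := (hmemks mn).mpr hmnu
      rw [hkscons] at hmnks
      rcases List.mem_cons.mp hmnks with h | h
      · omega
      · have := (List.pairwise_cons.mp hpw').1 mn h; omega
    have hlast : (hd :: tl).getLast (by simp) = mx := by
      have h1 : (hd :: tl).getLast (by simp) ∈ ks := by
        rw [hkscons]; exact List.getLast_mem _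
      have h2 : (hd :: tl).getLast (by simp) ≤ mx := hmxmax _ ((hmemks _).mp h1)
      have h3 : mx ≤ (hd :: tl).getLast (by simp) := by
        have := pvLast_le ks hpw hksne mx ((hmemks mx).mpr hmxu)
        simpa [hkscons] using this
      omega
    have htlmem : ∀ x, x ∈ tl ↔ (x ∈ u ∧ mn < x) := by
      intro x
      constructor
      · intro hx
        have hxks : x ∈ ks := by simp [hkscons, hx]
        refine ⟨(hmemks x).mp hxks, ?_⟩
        have := (List.pairwise_cons.mp hpw').1 x hx
        omega
      · rintro ⟨hxu, hxgt⟩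
        have : x ∈ ks := (hmemks x).mpr hxu
        rw [hkscons] at this
        rcases List.mem_cons.mp this with h | h
        · omega
        · exact h
    obtain ⟨lf, hlf⟩ := pvA_chain t u mx tl mn [] mn hmnu
      (List.pairwise_cons.mp hpw').2 htlmem (by rw [← hhd]; exact hlast)
    rw [interpolate_missing_pos]
    simp only [hmn, hmx]
    rw [hlf, hB, hkscons, hhd]
    simp

-- ===== VERDICT (by name: the statement is the Claim_ definition above) =====
theorem interpolate_missing_pos_spec : Claim_equal_interpolate_missing_pos := by
  intro t u _ _
  unfold Spec_interpolate_missing_pos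
  exact pv_main_eq t u
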